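-- pv_equiv track=rewrite | github.com/little-worm/coreset_CO_ICLR2025 | my_nips24_mis/catNips2024Code_0313/_my_CO2024/myCoreset_mis/mytreePackage/###myTree_mis_old.py | my_reshapeList
-- ===== SOURCE A (Python) =====
-- def my_reshapeList(org_list,example_list):
--     tmp_index = [len(li) for li in example_list]
--     org_lists = []
--     ind00 = 0
--     for ind in tmp_index:
--         ind11 = ind00 + ind
--         org_lists.append( org_list[ind00:ind11] )
--         ind00 = ind11
--     return org_lists
-- ===== SOURCE B (Python) =====
-- def my_reshapeList(org_list, example_list):
--     it = iter(org_list)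
--     return [[x for _, x in zip(li, it)] for li in example_list]
-- ===== Notes on version B (the rewrite author's own statement) =====
-- stated objective: idiomatic
-- what changed: B replaces the explicit ind00/ind11 index arithmetic and repeated slicing of org_list with a single iterator over org_list that each sublist's zip consumes in order (one pass, no index state).
import Mathlib
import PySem

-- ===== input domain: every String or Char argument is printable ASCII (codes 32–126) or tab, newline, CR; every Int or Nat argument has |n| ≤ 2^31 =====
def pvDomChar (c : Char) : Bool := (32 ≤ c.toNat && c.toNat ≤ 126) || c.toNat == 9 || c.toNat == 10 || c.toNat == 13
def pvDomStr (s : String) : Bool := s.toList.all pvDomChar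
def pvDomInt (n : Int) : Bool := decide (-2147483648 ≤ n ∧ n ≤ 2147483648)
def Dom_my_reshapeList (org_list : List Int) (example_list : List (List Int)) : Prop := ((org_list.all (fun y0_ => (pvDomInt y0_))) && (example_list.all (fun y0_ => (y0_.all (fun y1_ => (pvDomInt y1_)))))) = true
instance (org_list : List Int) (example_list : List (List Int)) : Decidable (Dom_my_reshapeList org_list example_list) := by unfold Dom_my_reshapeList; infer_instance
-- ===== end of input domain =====

-- ===== PORT A =====
-- A: builds tmp_index = lengths, then a loop over it keeping a running start index ind00,
-- appending org_list[ind00:ind11] each step.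
def my_reshapeList (org_list : List Int) (example_list : List (List Int)) : List (List Int) :=
  let tmp_index : List Int := example_list.map (fun li => (li.length : Int))
  (tmp_index.foldl
    (fun (st : List (List Int) × Int) ind =>
      let ind11 := st.2 + ind
      (st.1 ++ [PySem.List.slice org_list (some st.2) (some ind11)], ind11))
    ([], 0)).1

-- ===== PORT B =====
-- B: one iterator over org_list; each sublist's zip(li, it) consumes len(li) items.
-- The remaining (unconsumed) part of the iterator is modelled by the suffix `rem`.
def my_reshapeList_alt_go (rem : List Int) (ex : List (List Int)) : List (List Int) :=
  match ex with
  | [] => []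
  | li :: rest =>
      ((li.zip rem).map Prod.snd) :: my_reshapeList_alt_go (rem.drop li.length) rest

def my_reshapeList_alt (org_list : List Int) (example_list : List (List Int)) : List (List Int) :=
  my_reshapeList_alt_go org_list example_list

-- ===== PRECONDITION & SPEC =====
def Spec_my_reshapeList (org_list : List Int) (example_list : List (List Int)) (out : List (List Int)) : Prop := out = my_reshapeList_alt org_list example_list
instance (org_list : List Int) (example_list : List (List Int)) (out : List (List Int)) : Decidable (Spec_my_reshapeList org_list example_list out) := by unfold Spec_my_reshapeList; infer_instance

-- ===== CLAIM (what is proved, stated in full; the proofs are below) =====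
def Claim_equal_my_reshapeList : Prop := ∀ (org_list : List Int) (example_list : List (List Int)), Dom_my_reshapeList org_list example_list → Spec_my_reshapeList org_list example_list (my_reshapeList org_list example_list)

-- ===== LEMMAS AND PROOFS =====

-- zip with the sublist on the left truncates to li.length elements of rem
theorem zip_snd_eq_take (li : List Int) (rem : List Int) :
    (li.zip rem).map Prod.snd = rem.take li.length := by
  induction li generalizing rem with
  | nil => simp
  | cons a li ih =>
    cases rem with
    | nil => simp
    | cons r rem => simp [ih]

-- B's recursion, expressed on the suffix org_list.drop j, equals A's fold started at index j
theorem fold_eq_go (org_list : List Int) (ex : List (List Int)) :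
    ∀ (j : Nat) (acc : List (List Int)),
      ((ex.map (fun li => (li.length : Int))).foldl
        (fun (st : List (List Int) × Int) ind =>
          let ind11 := st.2 + ind
          (st.1 ++ [PySem.List.slice org_list (some st.2) (some ind11)], ind11))
        (acc, (j : Nat))).1
      = acc ++ my_reshapeList_alt_go (org_list.drop j) ex := by
  induction ex with
  | nil => intro j acc; simp [my_reshapeList_alt_go]
  | cons li rest ih =>
    intro j acc
    simp only [List.map_cons, List.foldl_cons]
    have hs : PySem.List.slice org_list (some (j : Int)) (some ((j : Int) + (li.length : Int)))
        = (org_list.drop j).take li.length := PySem.List.slice_natCast_add org_list j li.length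
    have hcast : ((j : Int) + (li.length : Int)) = ((j + li.length : Nat) : Int) := by push_cast; ring
    rw [hcast] at hs ⊢
    rw [ih (j + li.length) (acc ++ [PySem.List.slice org_list (some (j : Int)) (some ((j + li.length : Nat) : Int))])]
    rw [hs]
    simp [my_reshapeList_alt_go, zip_snd_eq_take, List.drop_drop]

-- ===== VERDICT (by name: the statement is the Claim_ definition above) =====
theorem my_reshapeList_spec : Claim_equal_my_reshapeList := by
  intro org_list example_list _
  unfold Spec_my_reshapeList my_reshapeList my_reshapeList_alt
  simpa using fold_eq_go org_list example_list 0 []
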